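-- pv_equiv track=rewrite | github.com/KasperLFabricius/RCSect | ui/results.py | _normalize_case_name
-- ===== SOURCE A (Python) =====
-- def _normalize_case_name(case_name) -> tuple[str, str]:
--     if isinstance(case_name, str):
--         display_name = case_name.strip()
--     elif case_name is None:
--         display_name = ""
--     else:
--         display_name = str(case_name).strip()
--
--     if not display_name:
--         display_name = "Unnamed case"
--
--     slug = "".join(ch.lower() if ch.isalnum() else "_" for ch in display_name)
--     slug = "_".join(part for part in slug.split("_") if part)
--     if not slug:
--         slug = "unnamed_case"
--
--     return display_name, slug
-- ===== SOURCE B (Python) =====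
-- def _normalize_case_name(case_name) -> tuple[str, str]:
--     if isinstance(case_name, str):
--         display_name = case_name.strip()
--     elif case_name is None:
--         display_name = ""
--     else:
--         display_name = str(case_name).strip()
--
--     if not display_name:
--         display_name = "Unnamed case"
--
--     words = []
--     buf = []
--     for ch in display_name:
--         if ch.isalnum():
--             buf.append(ch.lower())
--         else:
--             if buf:
--                 words.append("".join(buf))
--             buf = []
--     if buf:
--         words.append("".join(buf))
--
--     slug = "_".join(words)
--     if not slug:
--         slug = "unnamed_case"
--
--     return display_name, slug
-- ===== Notes on version B (the rewrite author's own statement) =====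
-- stated objective: alternative
-- what changed: Replaces A's three-phase slug pipeline (map every char to lower-or-underscore, split the result on '_', re-join the non-empty parts) by a single grouping pass over display_name that accumulates lowercased alnum runs into a word buffer and flushes it on each non-alnum character.
import Mathlib
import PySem

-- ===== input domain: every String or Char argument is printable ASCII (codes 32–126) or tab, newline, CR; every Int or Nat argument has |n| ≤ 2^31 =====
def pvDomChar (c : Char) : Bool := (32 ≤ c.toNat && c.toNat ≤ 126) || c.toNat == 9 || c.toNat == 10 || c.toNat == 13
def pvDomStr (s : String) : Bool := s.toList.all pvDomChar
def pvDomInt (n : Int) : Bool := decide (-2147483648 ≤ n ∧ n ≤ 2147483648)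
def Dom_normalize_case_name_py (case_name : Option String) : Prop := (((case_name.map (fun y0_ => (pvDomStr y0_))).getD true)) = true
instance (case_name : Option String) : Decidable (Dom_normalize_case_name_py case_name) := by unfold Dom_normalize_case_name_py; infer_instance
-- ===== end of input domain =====

-- B replaces A's map/split/join slug pipeline by a single grouping pass that collects
-- lowercased alnum runs as words; same cost, different decomposition (objective: alternative).


-- ===== PORT A =====
-- (under the Option String signature A's 'else: str(case_name).strip()' branch is unreachable)
def normalize_case_name_py (case_name : Option String) : String × String :=
  let dn0 : List Char :=
    match case_name with
    | some s => PySem.Chars.strip s.toList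
    | none => []
  let dn : List Char := if dn0.isEmpty then "Unnamed case".toList else dn0
  -- "".join(ch.lower() if ch.isalnum() else "_" for ch in display_name)
  let slug0 : List Char :=
    dn.map (fun ch => if PySem.Chars.isalnum ch then PySem.Chars.lowerChar ch else '_')
  -- "_".join(part for part in slug.split("_") if part)
  let slug1 : List Char :=
    PySem.Chars.join ['_'] ((PySem.Chars.splitOn slug0 ['_']).filter (fun p => !p.isEmpty))
  let slug : List Char := if slug1.isEmpty then "unnamed_case".toList else slug1
  (String.ofList dn, String.ofList slug)

-- ===== PORT B =====
-- the single grouping pass of Source B: (words, buf) state, flush buf on each non-alnum char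
def pvBgo : List Char → List (List Char) → List Char → List (List Char)
  | [], ws, buf => if buf.isEmpty then ws else ws ++ [buf]
  | c :: cs, ws, buf =>
    if PySem.Chars.isalnum c then pvBgo cs ws (buf ++ [PySem.Chars.lowerChar c])
    else pvBgo cs (if buf.isEmpty then ws else ws ++ [buf]) []

def normalize_case_name_py_alt (case_name : Option String) : String × String :=
  let dn0 : List Char :=
    match case_name with
    | some s => PySem.Chars.strip s.toList
    | none => []
  let dn : List Char := if dn0.isEmpty then "Unnamed case".toList else dn0
  let words : List (List Char) := pvBgo dn [] []
  let slug1 : List Char := PySem.Chars.join ['_'] words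
  let slug : List Char := if slug1.isEmpty then "unnamed_case".toList else slug1
  (String.ofList dn, String.ofList slug)

-- ===== PRECONDITION & SPEC =====
def Spec_normalize_case_name_py (case_name : Option String) (out : String × String) : Prop := out = normalize_case_name_py_alt case_name
instance (case_name : Option String) (out : String × String) : Decidable (Spec_normalize_case_name_py case_name out) := by unfold Spec_normalize_case_name_py; infer_instance

-- ===== CLAIM (what is proved, stated in full; the proofs are below) =====
def Claim_equal_normalize_case_name_py : Prop := ∀ (case_name : Option String), Dom_normalize_case_name_py case_name → Spec_normalize_case_name_py case_name (normalize_case_name_py case_name)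

-- ===== LEMMAS AND PROOFS =====

-- reference split of a list of chars on '_' (the first piece continues cur)
def pvSplit (cur : List Char) : List Char → List (List Char)
  | [] => [cur]
  | c :: rest => if c = '_' then cur :: pvSplit [] rest else pvSplit (cur ++ [c]) rest

lemma pvSplitOn_go_eq : ∀ (fuel : Nat) (l cur : List Char) (acc : List (List Char)),
    l.length < fuel →
    PySem.Chars.splitOn.go ['_'] fuel l cur acc = acc.reverse ++ pvSplit cur.reverse l := by
  intro fuel
  induction fuel with
  | zero => intro l cur acc h; omega
  | succ fuel ih =>
    intro l cur acc h
    cases l with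
    | nil =>
      rw [show PySem.Chars.splitOn.go ['_'] (fuel + 1) [] cur acc
          = (cur.reverse :: acc).reverse from rfl]
      simp [pvSplit]
    | cons c rest =>
      rw [show PySem.Chars.splitOn.go ['_'] (fuel + 1) (c :: rest) cur acc
          = if List.isPrefixOf ['_'] (c :: rest) = true
            then PySem.Chars.splitOn.go ['_'] fuel (List.drop 1 (c :: rest)) []
                   (cur.reverse :: acc)
            else PySem.Chars.splitOn.go ['_'] fuel rest (c :: cur) acc from rfl]
      have hlen : rest.length < fuel := by simp at h; omega
      by_cases hc : c = '_'
      · subst hc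
        rw [if_pos (by simp [List.isPrefixOf]), List.drop_one, List.tail_cons,
          ih _ _ _ hlen]
        simp [pvSplit]
      · rw [if_neg (by simp [List.isPrefixOf]; exact fun habs => hc habs.symm),
          ih _ _ _ hlen]
        simp [pvSplit, hc]

lemma pvSplitOn_eq (s : List Char) : PySem.Chars.splitOn s ['_'] = pvSplit [] s := by
  unfold PySem.Chars.splitOn
  rw [pvSplitOn_go_eq (s.length + 1) s [] [] (by omega)]
  simp

lemma pvLower_ne_underscore (c : Char) (h : PySem.Chars.isalnum c = true) :
    PySem.Chars.lowerChar c ≠ '_' := by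
  unfold PySem.Chars.lowerChar
  by_cases hu : PySem.Chars.isupper c = true
  · rw [if_pos hu]
    have hb : 'A' ≤ c ∧ c ≤ 'Z' := by simpa [PySem.Chars.isupper] using hu
    have h1 : 65 ≤ c.toNat := hb.1
    have h2 : c.toNat ≤ 90 := hb.2
    intro habs
    have h0 : (Char.ofNat (c.toNat + 32)).toNat = 95 := by rw [habs]; rfl
    have h3 := Char.toNat_ofNat (c.toNat + 32)
    rw [if_pos (Or.inl (by omega))] at h3
    omega
  · rw [if_neg hu]
    intro habs
    rw [habs] at h
    simp [PySem.Chars.isalnum, PySem.Chars.isalpha, PySem.Chars.isdigit,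
      PySem.Chars.isupper, PySem.Chars.islower] at h

lemma pvBgo_eq : ∀ (cs : List Char) (ws : List (List Char)) (buf : List Char),
    pvBgo cs ws buf =
      ws ++ (pvSplit buf (cs.map
        (fun ch => if PySem.Chars.isalnum ch then PySem.Chars.lowerChar ch else '_'))).filter
          (fun p => !p.isEmpty) := by
  intro cs
  induction cs with
  | nil =>
    intro ws buf
    cases buf with
    | nil => simp [pvBgo, pvSplit]
    | cons b bs => simp [pvBgo, pvSplit]
  | cons c cs ih =>
    intro ws buf
    by_cases hc : PySem.Chars.isalnum c = true
    · have hstep : pvBgo (c :: cs) ws buf = pvBgo cs ws (buf ++ [PySem.Chars.lowerChar c]) := by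
        simp [pvBgo, hc]
      rw [hstep, ih, List.map_cons, if_pos hc]
      rw [show pvSplit buf (PySem.Chars.lowerChar c :: cs.map
          (fun ch => if PySem.Chars.isalnum ch then PySem.Chars.lowerChar ch else '_')) =
        pvSplit (buf ++ [PySem.Chars.lowerChar c]) (cs.map
          (fun ch => if PySem.Chars.isalnum ch then PySem.Chars.lowerChar ch else '_'))
        from by simp [pvSplit, pvLower_ne_underscore c hc]]
    · have hstep : pvBgo (c :: cs) ws buf
          = pvBgo cs (if buf.isEmpty then ws else ws ++ [buf]) [] := by
        simp [pvBgo, hc]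
      rw [hstep, ih, List.map_cons, if_neg hc]
      rw [show pvSplit buf ('_' :: cs.map
          (fun ch => if PySem.Chars.isalnum ch then PySem.Chars.lowerChar ch else '_')) =
        buf :: pvSplit [] (cs.map
          (fun ch => if PySem.Chars.isalnum ch then PySem.Chars.lowerChar ch else '_'))
        from by simp [pvSplit]]
      cases hbuf : buf.isEmpty
      · have hne : buf ≠ [] := by simpa [List.isEmpty_iff] using hbuf
        simp [List.filter, hbuf]
      · have heq : buf = [] := by simpa [List.isEmpty_iff] using hbuf
        simp [List.filter, heq]

-- ===== VERDICT (by name: the statement is the Claim_ definition above) =====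
theorem normalize_case_name_py_spec : Claim_equal_normalize_case_name_py := by
  intro case_name _
  unfold Spec_normalize_case_name_py normalize_case_name_py normalize_case_name_py_alt
  simp only [pvSplitOn_eq, pvBgo_eq, List.nil_append]
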